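-- pv_equiv track=rewrite | github.com/NileshBarandwal/mtp2-post-quantum-artemis-zkml | src/kzg_pc_full.py | poly_sub
-- ===== SOURCE A (Python) =====
-- def poly_sub(p, q, mod):
--     """Subtract polynomial q from p over F_mod."""
--     length = max(len(p), len(q))
--     result = [0] * length
--     for i in range(len(p)):
--         result[i] = (result[i] + p[i]) % mod
--     for i in range(len(q)):
--         result[i] = (result[i] - q[i]) % mod
--     return result
-- ===== SOURCE B (Python) =====
-- def poly_sub(p, q, mod):
--     """Subtract polynomial q from p over F_mod: zip the common prefix, then reduce the leftover tail."""
--     out = [(x - y) % mod for x, y in zip(p, q)]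
--     if len(p) >= len(q):
--         out += [x % mod for x in p[len(q):]]
--     else:
--         out += [(-y) % mod for y in q[len(p):]]
--     return out
-- ===== Notes on version B (the rewrite author's own statement) =====
-- stated objective: alternative
-- what changed: Replaces A's preallocated zero array mutated by two index-based accumulation passes (add p mod m, then subtract q mod m) with a structural decomposition: zip the common prefix computing (x-y) % mod pairwise, then append the reduced leftover tail of the longer polynomial (p[i] % mod or (-q[i]) % mod) - no index arithmetic, no preallocation, no in-place mutation.
import Mathlib
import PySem

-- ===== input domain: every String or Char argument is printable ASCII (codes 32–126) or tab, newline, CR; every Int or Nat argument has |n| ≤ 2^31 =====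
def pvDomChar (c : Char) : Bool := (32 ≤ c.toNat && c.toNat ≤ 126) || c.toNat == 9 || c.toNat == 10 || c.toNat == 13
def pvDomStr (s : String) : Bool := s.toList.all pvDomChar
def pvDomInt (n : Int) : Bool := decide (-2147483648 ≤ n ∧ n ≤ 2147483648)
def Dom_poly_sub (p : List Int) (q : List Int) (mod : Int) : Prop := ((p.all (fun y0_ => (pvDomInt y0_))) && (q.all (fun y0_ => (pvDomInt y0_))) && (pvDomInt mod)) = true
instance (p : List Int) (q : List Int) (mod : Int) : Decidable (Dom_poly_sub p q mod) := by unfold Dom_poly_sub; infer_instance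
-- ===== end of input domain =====

-- B zips the common prefix with (x-y) % mod and appends the reduced leftover tail, instead of A's two in-place accumulation passes; objective: alternative decomposition.


-- ===== PORT A =====
-- result = [0]*length; first loop adds p[i] mod m in place, second loop subtracts q[i] mod m in place.
def poly_sub (p : List Int) (q : List Int) (mod : Int) : List Int :=
  let length := max p.length q.length
  let result := List.replicate length (0 : Int)
  let result := (List.range p.length).foldl
    (fun r i => r.set i (PySem.Int.mod (r.getD i 0 + p.getD i 0) mod)) result
  (List.range q.length).foldl
    (fun r i => r.set i (PySem.Int.mod (r.getD i 0 - q.getD i 0) mod)) result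

-- ===== PORT B =====
-- zip the common prefix with (x - y) % mod, then append the reduced leftover tail of the longer list.
def poly_sub_alt (p : List Int) (q : List Int) (mod : Int) : List Int :=
  let out := List.zipWith (fun x y => PySem.Int.mod (x - y) mod) p q
  if p.length ≥ q.length then
    out ++ (p.drop q.length).map (fun x => PySem.Int.mod x mod)
  else
    out ++ (q.drop p.length).map (fun y => PySem.Int.mod (-y) mod)

-- ===== PRECONDITION & SPEC =====
-- Pre_ excludes exactly the inputs where Python A raises ZeroDivisionError: mod = 0 with at
-- least one nonempty polynomial (with p = q = [] neither loop runs, so A returns [] even for mod = 0).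
def Pre_poly_sub (p : List Int) (q : List Int) (mod : Int) : Prop :=
  mod ≠ 0 ∨ (p = [] ∧ q = [])
instance (p : List Int) (q : List Int) (mod : Int) : Decidable (Pre_poly_sub p q mod) := by
  unfold Pre_poly_sub; infer_instance

def pvWitness_poly_sub : List Int × List Int × Int := ([1, 2, 3], [4, 5], 7)

def Spec_poly_sub (p : List Int) (q : List Int) (mod : Int) (out : List Int) : Prop := out = poly_sub_alt p q mod
instance (p : List Int) (q : List Int) (mod : Int) (out : List Int) : Decidable (Spec_poly_sub p q mod out) := by unfold Spec_poly_sub; infer_instance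

-- ===== CLAIM (what is proved, stated in full; the proofs are below) =====
def Claim_equal_poly_sub : Prop := ∀ (p : List Int) (q : List Int) (mod : Int), Dom_poly_sub p q mod → Pre_poly_sub p q mod → Spec_poly_sub p q mod (poly_sub p q mod)

-- ===== LEMMAS AND PROOFS =====

-- Python %: fmod absorbs an inner fmod on the left of a subtraction.
theorem fmod_sub_fmod (a b m : Int) : ((a.fmod m) - b).fmod m = (a - b).fmod m := by
  rw [Int.fmod_def a m]
  ring_nf
  rw [sub_right_comm, Int.sub_mul_fmod_self_left]

-- getD after set: the written index reads back the value, others are unchanged.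
theorem getD_set_self (l : List Int) (i : Nat) (a : Int) (h : i < l.length) :
    (l.set i a).getD i 0 = a := by
  simp [List.getD, h]

theorem getD_set_ne (l : List Int) (i j : Nat) (a : Int) (h : i ≠ j) :
    (l.set i a).getD j 0 = l.getD j 0 := by
  simp [List.getD, h]

-- A's in-place loop: length is preserved and entry j is f applied once iff j < n.
theorem foldl_set_spec (f : Int → Nat → Int) :
    ∀ (n : Nat) (r : List Int), n ≤ r.length →
      ((List.range n).foldl (fun r i => r.set i (f (r.getD i 0) i)) r).length = r.length ∧
      ∀ j : Nat, ((List.range n).foldl (fun r i => r.set i (f (r.getD i 0) i)) r).getD j 0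
        = if j < n then f (r.getD j 0) j else r.getD j 0 := by
  intro n
  induction n with
  | zero => intro r _; simp
  | succ n ih =>
    intro r hn
    have hn' : n ≤ r.length := by omega
    obtain ⟨hlen, hget⟩ := ih r hn'
    rw [List.range_succ, List.foldl_append]
    simp only [List.foldl_cons, List.foldl_nil]
    refine ⟨by rw [List.length_set, hlen], ?_⟩
    intro j
    have hfn : ((List.range n).foldl (fun r i => r.set i (f (r.getD i 0) i)) r).getD n 0
        = r.getD n 0 := by rw [hget n]; simp
    rw [hfn]
    by_cases hj : j = n
    · subst hj
      rw [getD_set_self _ _ _ (by rw [hlen]; omega), if_pos (by omega)]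
    · rw [getD_set_ne _ _ _ _ (fun h => hj h.symm), hget j]
      by_cases h1 : j < n
      · rw [if_pos h1, if_pos (by omega)]
      · rw [if_neg h1, if_neg (by omega)]

theorem getD_replicate_zero (n j : Nat) : (List.replicate n (0 : Int)).getD j 0 = 0 := by
  simp [List.getD, List.getElem?_replicate]
  split <;> rfl

-- B's result, elementwise: length is max, and entry j is the direct case split.
theorem poly_sub_alt_length (p q : List Int) (m : Int) :
    (poly_sub_alt p q m).length = max p.length q.length := by
  unfold poly_sub_alt
  by_cases h : p.length ≥ q.length
  · rw [if_pos h]; simp; omega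
  · rw [if_neg h]; simp; omega

theorem poly_sub_alt_getElem (p q : List Int) (m : Int) (j : Nat)
    (hj : j < (poly_sub_alt p q m).length) :
    (poly_sub_alt p q m)[j] =
      if hq : j < q.length then
        (if hp : j < p.length then PySem.Int.mod (p[j] - q[j]) m
         else PySem.Int.mod (-q[j]) m)
      else PySem.Int.mod (p[j]'(by
        have := poly_sub_alt_length p q m; omega)) m := by
  unfold poly_sub_alt
  by_cases h : p.length ≥ q.length
  · simp only [if_pos h]
    by_cases hq : j < q.length
    · have hzl : j < (List.zipWith (fun x y => PySem.Int.mod (x - y) m) p q).length := by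
        simp; omega
      rw [List.getElem_append_left hzl]
      rw [dif_pos hq, dif_pos (by omega)]
      simp
    · have hzl : (List.zipWith (fun x y => PySem.Int.mod (x - y) m) p q).length = q.length := by
        simp; omega
      rw [List.getElem_append_right (by omega)]
      rw [dif_neg hq]
      have hidx : q.length + (j - q.length) = j := by omega
      simp [hzl, hidx]
  · simp only [if_neg h]
    by_cases hp : j < p.length
    · have hzl : j < (List.zipWith (fun x y => PySem.Int.mod (x - y) m) p q).length := by
        simp; omega
      rw [List.getElem_append_left hzl]
      rw [dif_pos (by omega), dif_pos hp]
      simp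
    · have hzl : (List.zipWith (fun x y => PySem.Int.mod (x - y) m) p q).length = p.length := by
        simp; omega
      have hq : j < q.length := by
        have := poly_sub_alt_length p q m
        simp only [poly_sub_alt, if_neg h] at hj
        simp at hj; omega
      rw [List.getElem_append_right (by omega)]
      rw [dif_pos hq, dif_neg hp]
      have hidx : p.length + (j - p.length) = j := by omega
      simp [hzl, hidx]

-- ===== VERDICT (by name: the statement is the Claim_ definition above) =====
theorem poly_sub_spec : Claim_equal_poly_sub := by
  intro p q m _ _
  unfold Spec_poly_sub poly_sub
  simp only []
  set n := max p.length q.length with hn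
  set f1 : Int → Nat → Int := fun v i => PySem.Int.mod (v + p.getD i 0) m with hf1
  set f2 : Int → Nat → Int := fun v i => PySem.Int.mod (v - q.getD i 0) m with hf2
  set r0 := List.replicate n (0 : Int) with hr0
  have hlen0 : r0.length = n := by simp [hr0]
  obtain ⟨hlen1, hget1⟩ := foldl_set_spec f1 p.length r0 (by omega)
  set r1 := (List.range p.length).foldl (fun r i => r.set i (f1 (r.getD i 0) i)) r0 with hr1
  obtain ⟨hlen2, hget2⟩ := foldl_set_spec f2 q.length r1 (by omega)
  set r2 := (List.range q.length).foldl (fun r i => r.set i (f2 (r.getD i 0) i)) r1 with hr2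
  apply List.ext_getElem
  · rw [hlen2, hlen1, hlen0, poly_sub_alt_length]
  · intro j hj1 hj2
    have hjn : j < n := by simpa [hlen2, hlen1, hlen0] using hj1
    have hA : r2[j] = r2.getD j 0 := by
      rw [List.getD, List.getElem?_eq_getElem hj1]; rfl
    rw [hA, hget2 j, poly_sub_alt_getElem p q m j hj2]
    have h1j : r1.getD j 0 = if j < p.length then f1 (r0.getD j 0) j else r0.getD j 0 := hget1 j
    have h0j : r0.getD j 0 = 0 := by rw [hr0]; exact getD_replicate_zero n j
    have hfmod : ∀ a b : Int, PySem.Int.mod a b = a.fmod b := fun _ _ => rfl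
    by_cases hq : j < q.length
    · rw [if_pos hq, dif_pos hq, h1j]
      by_cases hp : j < p.length
      · rw [if_pos hp, dif_pos hp, hf1, hf2]
        simp only [h0j, zero_add]
        simp only [hfmod, List.getD, List.getElem?_eq_getElem hp,
          List.getElem?_eq_getElem hq, Option.getD_some]
        exact fmod_sub_fmod _ _ _
      · rw [if_neg hp, dif_neg hp, h0j, hf2]
        simp only [hfmod, zero_sub, List.getD, List.getElem?_eq_getElem hq, Option.getD_some]
    · have hp : j < p.length := by omega
      rw [if_neg hq, dif_neg hq, h1j, if_pos hp, h0j, hf1]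
      simp only [hfmod, zero_add, List.getD, List.getElem?_eq_getElem hp, Option.getD_some]
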